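-- pv_equiv track=rewrite | github.com/ariuk44/retake_exam_prep | day_2.py | countSquarePairs1
-- ===== SOURCE A (Python) =====
-- def isPerfectSquare(n):
--     if n < 0:
--         return False
--     i = 1
--     while i * i <= n:
--         if i * i == n:
--             return True
--         i += 1
--     return False
--
-- def countSquarePairs1(arr):
--     cnt = 0
--     for i in range(len(arr)):
--         for j in range(i + 1, len(arr)):
--             x = arr[i]
--             y = arr[j]
--             if x > 0 and y > 0 and isPerfectSquare(x + y):
--                 cnt += 1
--     return cnt
-- ===== SOURCE B (Python) =====
-- def _is_square(n):
--     if n <= 0: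
--         return False
--     lo, hi = 1, n
--     while lo <= hi:
--         m = (lo + hi) // 2
--         sq = m * m
--         if sq == n:
--             return True
--         if sq < n:
--             lo = m + 1
--         else:
--             hi = m - 1
--     return False
--
-- def countSquarePairs1(arr):
--     seen = {}
--     total = 0
--     for y in arr:
--         if y > 0:
--             for x, c in seen.items():
--                 if _is_square(x + y):
--                     total += c
--             seen[y] = seen.get(y, 0) + 1
--     return total
-- ===== Notes on version B (the rewrite author's own statement) =====
-- stated objective: faster
-- what changed: Replaces the nested index-pair scan with a single pass that keeps a dict counting previously seen positive values (each new element is matched against distinct earlier values with multiplicities), and replaces the O(sqrt(s)) trial-loop perfect-square test with an O(log s) integer binary search.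
import Mathlib
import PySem

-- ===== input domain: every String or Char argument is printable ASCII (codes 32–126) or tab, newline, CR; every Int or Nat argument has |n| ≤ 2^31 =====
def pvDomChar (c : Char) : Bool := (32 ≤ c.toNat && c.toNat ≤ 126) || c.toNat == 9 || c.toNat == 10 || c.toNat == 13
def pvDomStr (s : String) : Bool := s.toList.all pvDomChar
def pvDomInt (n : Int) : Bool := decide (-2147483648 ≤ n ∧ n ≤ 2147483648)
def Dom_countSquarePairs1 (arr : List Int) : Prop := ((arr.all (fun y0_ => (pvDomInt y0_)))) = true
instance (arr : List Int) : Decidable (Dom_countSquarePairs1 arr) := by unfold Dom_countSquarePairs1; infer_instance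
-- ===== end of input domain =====

-- B replaces A's nested index-pair scan by a one-pass dict counting earlier positive values
-- and A's trial-loop square test by an integer binary search; measured faster on large inputs.

-- ===== PORT A =====

-- A's `while i * i <= n` loop of isPerfectSquare, starting at i
def isqLoop (n i : Int) : Bool :=
  if _h : i * i ≤ n then
    if i * i = n then true else isqLoop n (i + 1)
  else false
termination_by (n + 1 - i).toNat
decreasing_by
  have h2 : 0 ≤ i * (i - 1) := by
    by_cases h' : i ≤ 0
    · have := mul_nonneg (a := -i) (b := -(i-1)) (by omega) (by omega); nlinarith
    · exact mul_nonneg (by omega) (by omega)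
  have : i ≤ n := by nlinarith
  omega

def isPerfectSquare (n : Int) : Bool :=
  if n < 0 then false else isqLoop n 1

def countSquarePairs1 (arr : List Int) : Int :=
  (PySem.List.pyRange 0 (PySem.List.len arr) 1).foldl (fun cnt i =>
    (PySem.List.pyRange (i + 1) (PySem.List.len arr) 1).foldl (fun cnt j =>
      let x := PySem.List.pyGetD arr i 0
      let y := PySem.List.pyGetD arr j 0
      if decide (x > 0) && decide (y > 0) && isPerfectSquare (x + y) then cnt + 1 else cnt)
      cnt) 0

-- ===== PORT B =====

-- Source B's `while lo <= hi` binary search for k in [lo, hi] with k * k = n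
def sqSearch (n lo hi : Int) : Bool :=
  if _h : lo ≤ hi then
    let m := PySem.Int.floordiv (lo + hi) 2
    if m * m = n then true
    else if m * m < n then sqSearch n (m + 1) hi
    else sqSearch n lo (m - 1)
  else false
termination_by (hi + 1 - lo).toNat
decreasing_by
  · have := PySem.Int.floordiv_two_mid_bounds _h (lo := lo) (hi := hi)
    omega
  · have := PySem.Int.floordiv_two_mid_bounds _h (lo := lo) (hi := hi)
    omega

def isSquareAlt (n : Int) : Bool :=
  if n ≤ 0 then false else sqSearch n 1 n

def countSquarePairs1_alt (arr : List Int) : Int :=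
  (arr.foldl (fun st y =>
    if y > 0 then
      (st.1.insert y (st.1.getD y 0 + 1),
       st.1.items.foldl (fun t p => if isSquareAlt (p.1 + y) then t + p.2 else t) st.2)
    else st)
    ((PySem.Dict.empty : PySem.Dict Int Int), (0 : Int))).2

-- ===== PRECONDITION & SPEC =====
def Spec_countSquarePairs1 (arr : List Int) (out : Int) : Prop := out = countSquarePairs1_alt arr
instance (arr : List Int) (out : Int) : Decidable (Spec_countSquarePairs1 arr out) := by unfold Spec_countSquarePairs1; infer_instance

-- ===== CLAIM (what is proved, stated in full; the proofs are below) =====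
def Claim_equal_countSquarePairs1 : Prop := ∀ (arr : List Int), Dom_countSquarePairs1 arr → Spec_countSquarePairs1 arr (countSquarePairs1 arr)

-- ===== LEMMAS AND PROOFS =====

-- the pair predicate of A's inner test
def goodB (x y : Int) : Bool := decide (x > 0) && decide (y > 0) && isPerfectSquare (x + y)

-- reference value: the pair count, grouped by the first element
def pairCount : List Int → Int
  | [] => 0
  | x :: l => (l.countP (fun y => goodB x y) : Int) + pairCount l

theorem isqLoop_iff (n i : Int) (hi : 1 ≤ i) :
    isqLoop n i = true ↔ ∃ k, i ≤ k ∧ k * k = n := by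
  revert hi
  fun_induction isqLoop n i with
  | case1 i h heq => intro hi; simpa using ⟨i, le_refl i, heq⟩
  | case2 i h hne ih =>
      intro hi
      rw [ih (by omega)]
      constructor
      · rintro ⟨k, hk, he⟩; exact ⟨k, by omega, he⟩
      · rintro ⟨k, hk, he⟩
        refine ⟨k, ?_, he⟩
        rcases eq_or_lt_of_le hk with h'|h'
        · exact absurd (h' ▸ he) hne
        · omega
  | case3 i h =>
      intro hi
      simp only [Bool.false_eq_true, false_iff]
      rintro ⟨k, hk, he⟩
      have : i * i ≤ k * k := by nlinarith
      nlinarith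

theorem sqSearch_iff (n lo hi : Int) (hlo : 1 ≤ lo) :
    sqSearch n lo hi = true ↔ ∃ k, lo ≤ k ∧ k ≤ hi ∧ k * k = n := by
  revert hlo
  fun_induction sqSearch n lo hi with
  | case1 lo hi h m heq =>
      intro hlo
      have hm : lo ≤ m ∧ m ≤ hi := PySem.Int.floordiv_two_mid_bounds h
      exact ⟨fun _ => ⟨m, by omega, by omega, heq⟩, fun _ => rfl⟩
  | case2 lo hi h m hne hlt ih =>
      intro hlo
      have hm : lo ≤ m ∧ m ≤ hi := PySem.Int.floordiv_two_mid_bounds h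
      rw [ih (by omega)]
      constructor
      · rintro ⟨k, h1, h2, h3⟩; exact ⟨k, by omega, h2, h3⟩
      · rintro ⟨k, h1, h2, h3⟩
        refine ⟨k, ?_, h2, h3⟩
        by_contra hc
        have hkm : k ≤ m := by omega
        have : k * k ≤ m * m := by nlinarith
        omega
  | case3 lo hi h m hne hge ih =>
      intro hlo
      have hm : lo ≤ m ∧ m ≤ hi := PySem.Int.floordiv_two_mid_bounds h
      rw [ih (by omega)]
      constructor
      · rintro ⟨k, h1, h2, h3⟩; exact ⟨k, h1, by omega, h3⟩
      · rintro ⟨k, h1, h2, h3⟩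
        refine ⟨k, h1, ?_, h3⟩
        by_contra hc
        have hkm : m ≤ k := by omega
        have : m * m ≤ k * k := by nlinarith
        omega
  | case4 lo hi h =>
      intro hlo
      simp only [Bool.false_eq_true, false_iff]
      rintro ⟨k, h1, h2, h3⟩
      omega

theorem isSquareAlt_eq (n : Int) : isSquareAlt n = isPerfectSquare n := by
  unfold isSquareAlt isPerfectSquare
  by_cases h0 : n ≤ 0
  · rcases lt_or_eq_of_le h0 with h | h
    · simp [h0, h]
    · subst h
      have hz : isqLoop 0 1 = false := by
        cases hh : isqLoop 0 1
        · rfl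
        · obtain ⟨k, hk, he⟩ := (isqLoop_iff 0 1 (le_refl 1)).mp hh
          nlinarith
      simp [hz]
  · have hn : 0 < n := by omega
    rw [if_neg h0, if_neg (by omega : ¬ n < 0)]
    have h1 := sqSearch_iff n 1 n (le_refl 1)
    have h2 := isqLoop_iff n 1 (le_refl 1)
    cases ha : sqSearch n 1 n <;> cases hb : isqLoop n 1 <;> try rfl
    · rw [ha] at h1; rw [hb] at h2
      obtain ⟨k, hk, he⟩ := h2.mp rfl
      have : k ≤ n := by nlinarith
      exact absurd (h1.mpr ⟨k, hk, this, he⟩) (by simp)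
    · rw [ha] at h1; rw [hb] at h2
      obtain ⟨k, hk, _, he⟩ := h1.mp rfl
      exact absurd (h2.mpr ⟨k, hk, he⟩) (by simp)

theorem pairCount_append (l : List Int) (y : Int) :
    pairCount (l ++ [y]) = pairCount l + (l.countP (fun x => goodB x y) : Int) := by
  induction l with
  | nil => simp [pairCount]
  | cons x l ih =>
      simp only [List.cons_append, pairCount, ih, List.countP_append, List.countP_cons]
      push_cast
      simp [List.countP_nil]
      ring

theorem goodB_nonpos_right (x y : Int) (hy : y ≤ 0) : goodB x y = false := by
  simp [goodB]; intro _ h; omega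

theorem goodB_nonpos_left (x y : Int) (hx : x ≤ 0) : goodB x y = false := by
  simp [goodB]; intro h; omega

theorem pairCount_middle (a b : List Int) (y : Int) (hy : y ≤ 0) :
    pairCount (a ++ y :: b) = pairCount (a ++ b) := by
  induction a with
  | nil =>
      simp only [List.nil_append, pairCount]
      have : b.countP (fun z => goodB y z) = 0 := by
        apply List.countP_eq_zero.mpr; intro z _; simp [goodB_nonpos_left y z hy]
      simp [this]
  | cons x a ih =>
      simp only [List.cons_append, pairCount, ih, List.countP_append, List.countP_cons,
        goodB_nonpos_right x y hy]
      push_cast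
      ring

theorem portA_sum (arr : List Int) :
    countSquarePairs1 arr = ((PySem.List.pyRange 0 (arr.length : Int) 1).map (fun i =>
      ((PySem.List.pyRange (i + 1) (arr.length : Int) 1).countP
        (fun j => goodB (PySem.List.pyGetD arr i 0) (PySem.List.pyGetD arr j 0)) : Int))).sum := by
  unfold countSquarePairs1
  simp only [PySem.List.len_eq]
  refine (PySem.List.foldl_congr_mem _ _
    (fun cnt i => cnt + ((PySem.List.pyRange (i + 1) (arr.length : Int) 1).countP
      (fun j => goodB (PySem.List.pyGetD arr i 0) (PySem.List.pyGetD arr j 0)) : Int)) _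
    ?_).trans ?_
  · intro acc i _
    exact PySem.List.foldl_if_add_one
      (fun j => goodB (PySem.List.pyGetD arr i 0) (PySem.List.pyGetD arr j 0)) _ _
  · rw [PySem.List.foldl_add]
    simp

theorem sumForm_eq_pairCount (arr : List Int) :
    ((PySem.List.pyRange 0 (arr.length : Int) 1).map (fun i =>
      ((PySem.List.pyRange (i + 1) (arr.length : Int) 1).countP
        (fun j => goodB (PySem.List.pyGetD arr i 0) (PySem.List.pyGetD arr j 0)) : Int))).sum
    = pairCount arr := by
  induction arr using List.reverseRecOn with
  | nil => simp [PySem.List.pyRange_one_eq_nil, pairCount]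
  | append_singleton l y ih =>
      have hlen : ((l ++ [y]).length : Int) = (l.length : Int) + 1 := by
        simp
      rw [hlen]
      rw [PySem.List.pyRange_one_succ_right (by positivity)]
      rw [List.map_append, List.sum_append]
      have hlast : ((PySem.List.pyRange ((l.length : Int) + 1) ((l.length : Int) + 1) 1).countP
          (fun j => goodB (PySem.List.pyGetD (l ++ [y]) (l.length : Int) 0)
            (PySem.List.pyGetD (l ++ [y]) j 0))) = 0 := by
        rw [PySem.List.pyRange_one_eq_nil (le_refl _)]; rfl
      have hy : PySem.List.pyGetD (l ++ [y]) (l.length : Int) 0 = y := by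
        rw [PySem.List.pyGetD_natCast, List.getD_eq_getElem?_getD, List.getElem?_concat_length]
        rfl
      have hmain : ∀ i ∈ PySem.List.pyRange 0 (l.length : Int) 1,
          ((PySem.List.pyRange (i + 1) ((l.length : Int) + 1) 1).countP
            (fun j => goodB (PySem.List.pyGetD (l ++ [y]) i 0) (PySem.List.pyGetD (l ++ [y]) j 0)) : Int)
          = ((PySem.List.pyRange (i + 1) (l.length : Int) 1).countP
              (fun j => goodB (PySem.List.pyGetD l i 0) (PySem.List.pyGetD l j 0)) : Int)
            + (if goodB (PySem.List.pyGetD l i 0) y then 1 else 0) := by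
        intro i hi
        rw [PySem.List.mem_pyRange_one] at hi
        have hilt : i < (l.length : Int) := hi.2
        have hget : ∀ k : Int, 0 ≤ k → k < (l.length : Int) →
            PySem.List.pyGetD (l ++ [y]) k 0 = PySem.List.pyGetD l k 0 := by
          intro k hk0 hklt
          rw [PySem.List.pyGetD_eq_getElem (l ++ [y]) 0 hk0 (by simp; omega),
              PySem.List.pyGetD_eq_getElem l 0 hk0 hklt]
          exact List.getElem_append_left (by omega)
        rw [hget i hi.1 hilt]
        rw [PySem.List.pyRange_one_succ_right (by omega)]
        rw [List.countP_append]
        have h1 : (PySem.List.pyRange (i + 1) (l.length : Int) 1).countP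
            (fun j => goodB (PySem.List.pyGetD l i 0) (PySem.List.pyGetD (l ++ [y]) j 0))
          = (PySem.List.pyRange (i + 1) (l.length : Int) 1).countP
            (fun j => goodB (PySem.List.pyGetD l i 0) (PySem.List.pyGetD l j 0)) := by
          apply List.countP_congr
          intro j hj
          rw [PySem.List.mem_pyRange_one] at hj
          rw [hget j (by omega) hj.2]
        have h2 : List.countP
            (fun j => goodB (PySem.List.pyGetD l i 0) (PySem.List.pyGetD (l ++ [y]) j 0))
            [(l.length : Int)]
          = if goodB (PySem.List.pyGetD l i 0) y then 1 else 0 := by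
          simp [List.countP_cons, hy]
        rw [h1, h2]
        push_cast
        split_ifs <;> simp
      rw [List.map_congr_left hmain]
      rw [PySem.List.sum_map_add_int, ih]
      have h3 : ((PySem.List.pyRange 0 (l.length : Int) 1).map
          (fun i => if goodB (PySem.List.pyGetD l i 0) y then (1 : Int) else 0)).sum
          = ((PySem.List.pyRange 0 (l.length : Int) 1).countP
              (fun i => goodB (PySem.List.pyGetD l i 0) y) : Int) :=
        PySem.List.sum_map_ite_one_zero _ _
      have h4 : (PySem.List.pyRange 0 (l.length : Int) 1).countP
            (fun i => goodB (PySem.List.pyGetD l i 0) y)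
          = l.countP (fun x => goodB x y) := by
        conv_rhs => rw [← PySem.List.map_pyGetD_pyRange_zero l 0]
        rw [List.countP_map]
        rfl
      rw [h3, h4]
      simp only [List.map_cons, List.map_nil, List.sum_cons, List.sum_nil, hlast,
        pairCount_append]
      push_cast
      ring

theorem ind_sum (s : List Int) (v : Int) (c : Int → Int) (hs : s.Nodup) :
    (s.map (fun k => if k = v then c k else 0)).sum = if v ∈ s then c v else 0 := by
  induction s with
  | nil => simp
  | cons x s ih =>
      simp only [List.nodup_cons] at hs
      simp only [List.map_cons, List.sum_cons, ih hs.2, List.mem_cons]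
      by_cases hx : x = v
      · subst hx
        simp [hs.1]
      · simp [hx, Ne.symm hx]

theorem counter_sum (q : List Int) (P : Int → Bool) :
    (((PySem.Set.ofList q).filter P).map (fun k => (q.count k : Int))).sum
    = (q.countP P : Int) := by
  induction q using List.reverseRecOn with
  | nil => simp [PySem.Set.ofList_nil]
  | append_singleton q v ih =>
      rw [PySem.Set.ofList_append_singleton]
      by_cases hv : v ∈ q
      · rw [PySem.Set.add_of_mem ((PySem.Set.mem_ofList _ _).mpr hv)]
        have hcnt : ∀ k ∈ (PySem.Set.ofList q).filter P,
            ((q ++ [v]).count k : Int) = (q.count k : Int) + (if k = v then 1 else 0) := by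
          intro k _
          rw [List.count_append]
          by_cases hkv : k = v
          · simp [hkv]
          · have : List.count k [v] = 0 := by rw [List.count_eq_zero]; simp [hkv]
            simp [this, hkv]
        rw [List.map_congr_left hcnt, PySem.List.sum_map_add_int]
        rw [ind_sum _ _ _ ((PySem.Set.nodup_ofList q).filter P)]
        rw [ih]
        have hvmem : v ∈ (PySem.Set.ofList q).filter P ↔ P v = true := by
          simp [List.mem_filter, PySem.Set.mem_ofList, hv]
        rw [List.countP_append]
        by_cases hPv : P v = true
        · simp [hvmem, hPv]
        · simp [hvmem, hPv]
      · rw [PySem.Set.add_of_not_mem (by rw [PySem.Set.mem_ofList]; exact hv)]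
        rw [List.filter_append, List.map_append, List.sum_append]
        have hcnt : ∀ k ∈ (PySem.Set.ofList q).filter P,
            ((q ++ [v]).count k : Int) = (q.count k : Int) := by
          intro k hk
          have : k ∈ q := (PySem.Set.mem_ofList _ _).mp (List.mem_filter.mp hk).1
          have hkv : k ≠ v := fun h => hv (h ▸ this)
          rw [List.count_append]
          have : List.count k [v] = 0 := by rw [List.count_eq_zero]; simp [hkv]
          simp [this]
        rw [List.map_congr_left hcnt, ih, List.countP_append]
        by_cases hPv : P v = true
        · simp [hPv, List.count_append, List.count_eq_zero_of_not_mem hv]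
        · simp [hPv]

theorem inner_loop_eq (q : List Int) (y t : Int) (hq : ∀ x ∈ q, 0 < x) (hy : 0 < y) :
    (PySem.Dict.counter q).items.foldl
      (fun t p => if isSquareAlt (p.1 + y) then t + p.2 else t) t
    = t + (q.countP (fun x => goodB x y) : Int) := by
  rw [PySem.Dict.items_counter]
  rw [PySem.List.foldl_if_eq_foldl_filter (fun p : Int × Int => isSquareAlt (p.1 + y)) (fun (t : Int) (p : Int × Int) => t + p.2)]
  rw [PySem.List.foldl_add]
  rw [List.filter_map, List.map_map]
  have : ((PySem.Set.ofList q).filter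
      ((fun p => isSquareAlt (p.1 + y)) ∘ (fun k => (k, (q.count k : Int))))).map
      ((fun p : Int × Int => p.2) ∘ (fun k => (k, (q.count k : Int))))
      = ((PySem.Set.ofList q).filter (fun k => isSquareAlt (k + y))).map
          (fun k => (q.count k : Int)) := rfl
  rw [this, counter_sum]
  have hc : q.countP (fun k => isSquareAlt (k + y)) = q.countP (fun x => goodB x y) := by
    apply List.countP_congr
    intro x hx
    have hxp := hq x hx
    simp [goodB, hxp, hy, isSquareAlt_eq]
  rw [hc]

-- the pairs B's pass adds while scanning l with the positives q already seen
def crossCount : List Int → List Int → Int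
  | _, [] => 0
  | q, y :: l =>
      if 0 < y then (q.countP (fun x => goodB x y) : Int) + crossCount (q ++ [y]) l
      else crossCount q l

theorem foldl_alt_eq (l : List Int) : ∀ (q : List Int) (t : Int), (∀ x ∈ q, 0 < x) →
    (l.foldl (fun st y =>
      if y > 0 then
        (st.1.insert y (st.1.getD y 0 + 1),
         st.1.items.foldl (fun t p => if isSquareAlt (p.1 + y) then t + p.2 else t) st.2)
      else st) ((PySem.Dict.counter q : PySem.Dict Int Int), t)).2
    = t + crossCount q l := by
  induction l with
  | nil => intro q t hq; simp [crossCount]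
  | cons y l ih =>
      intro q t hq
      by_cases hy : y > 0
      · rw [List.foldl_cons, if_pos hy]
        have hins : (PySem.Dict.counter q : PySem.Dict Int Int).insert y
            ((PySem.Dict.counter q).getD y 0 + 1) = PySem.Dict.counter (q ++ [y]) := by
          rw [← PySem.Dict.foldl_insert_getD_add_one_eq_counter q,
              ← PySem.Dict.foldl_insert_getD_add_one_eq_counter (q ++ [y]),
              List.foldl_append]
          rfl
        rw [show ((PySem.Dict.counter q : PySem.Dict Int Int).insert y
              ((PySem.Dict.counter q).getD y 0 + 1),
            (PySem.Dict.counter q).items.foldl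
              (fun t p => if isSquareAlt (p.1 + y) then t + p.2 else t) t)
          = ((PySem.Dict.counter (q ++ [y]) : PySem.Dict Int Int),
             t + (q.countP (fun x => goodB x y) : Int)) by
            rw [hins, inner_loop_eq q y t hq hy]]
        rw [ih (q ++ [y]) _ (by intro x hx; rcases List.mem_append.mp hx with h | h
                                · exact hq x h
                                · simp at h; omega)]
        simp only [crossCount, if_pos hy]
        ring
      · rw [List.foldl_cons, if_neg hy]
        rw [ih q t hq]
        simp only [crossCount, if_neg (by omega : ¬ 0 < y)]

theorem crossCount_eq (l : List Int) : ∀ q : List Int,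
    crossCount q l = pairCount (q ++ l) - pairCount q := by
  induction l with
  | nil => intro q; simp [crossCount]
  | cons y l ih =>
      intro q
      by_cases hy : 0 < y
      · simp only [crossCount, if_pos hy, ih (q ++ [y]), pairCount_append]
        rw [List.append_assoc]
        simp only [List.singleton_append]
        ring
      · simp only [crossCount, if_neg hy, ih q]
        rw [pairCount_middle q l y (by omega)]

theorem portB_eq_pairCount (arr : List Int) : countSquarePairs1_alt arr = pairCount arr := by
  unfold countSquarePairs1_alt
  have h0 : (PySem.Dict.empty : PySem.Dict Int Int) = PySem.Dict.counter [] := rfl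
  rw [h0, foldl_alt_eq arr [] 0 (by intro x hx; simp at hx)]
  rw [crossCount_eq arr []]
  simp [pairCount]

theorem portA_eq_pairCount (arr : List Int) : countSquarePairs1 arr = pairCount arr := by
  rw [portA_sum, sumForm_eq_pairCount]

-- ===== VERDICT (by name: the statement is the Claim_ definition above) =====
theorem countSquarePairs1_spec : Claim_equal_countSquarePairs1 := by
  intro arr _
  unfold Spec_countSquarePairs1
  rw [portA_eq_pairCount, portB_eq_pairCount]
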